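-- pv_equiv track=rewrite | github.com/kerfuffin/kerfuffin | Plot.py | get_max_tab
-- ===== SOURCE A (Python) =====
-- def get_max_tab(x):
--     clear_data_x = []
--     for i in range(len(x[0])):
--         _max = []
--         for j in range(len(x)):
--             try:
--                 _max.append(x[j][i])
--             except:
--                 pass
--         clear_data_x.append(max(_max))
--     return clear_data_x
-- ===== SOURCE B (Python) =====
-- def get_max_tab(x):
--     # Single row-major streaming pass: keep running per-column maxima,
--     # seeded from the first row (which fixes the number of columns).
--     maxes = list(x[0])
--     for row in x[1:]:
--         maxes = [max(m, v) for m, v in zip(maxes, row)] + maxes[len(row):]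
--     return maxes
-- ===== Notes on version B (the rewrite author's own statement) =====
-- stated objective: alternative
-- what changed: Replaces A's column-by-column rescans of all rows (with a try/except per cell) by one row-major streaming pass that folds each row into a running per-column maxima vector seeded from the first row.
-- outside the precondition, e.g. on get_max_tab([]): A raises IndexError, B raises IndexError
import Mathlib
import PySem

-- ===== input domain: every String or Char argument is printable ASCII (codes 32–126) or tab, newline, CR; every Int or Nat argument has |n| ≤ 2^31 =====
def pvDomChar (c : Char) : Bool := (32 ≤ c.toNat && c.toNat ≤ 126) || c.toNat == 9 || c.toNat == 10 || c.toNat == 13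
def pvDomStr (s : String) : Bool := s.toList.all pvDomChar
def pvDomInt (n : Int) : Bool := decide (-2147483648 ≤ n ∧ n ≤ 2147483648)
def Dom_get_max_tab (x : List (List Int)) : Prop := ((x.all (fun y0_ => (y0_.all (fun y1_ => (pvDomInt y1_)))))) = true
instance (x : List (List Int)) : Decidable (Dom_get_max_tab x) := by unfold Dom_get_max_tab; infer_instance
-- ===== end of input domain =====

-- B replaces A's column-by-column rescans by one row-major streaming pass over a
-- running per-column maxima vector seeded from the first row (alternative decomposition, same cost).


-- ===== PORT A =====
-- for i in range(len(x[0])): collect x[j][i] for each row (bare except skips short rows), append max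
def get_max_tab (x : List (List Int)) : List Int :=
  (PySem.List.pyRange 0 ((x.headD []).length : Int) 1).foldl
    (fun clear_data_x i =>
      let _max : List Int := x.foldl
        (fun acc row =>
          match PySem.List.pyGet? row i with
          | some v => acc ++ [v]          -- _max.append(x[j][i])
          | none => acc) []               -- except: pass
      clear_data_x ++ [(PySem.List.max? _max (fun v => v)).getD 0]) []

-- ===== PORT B =====
-- maxes = list(x[0]); for row in x[1:]: maxes = [max(m,v) for m,v in zip(maxes,row)] + maxes[len(row):]
def get_max_tab_alt (x : List (List Int)) : List Int :=
  (x.drop 1).foldl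
    (fun maxes row => List.zipWith max maxes row ++ maxes.drop row.length)
    (x.headD [])

-- ===== PRECONDITION & SPEC =====
-- Pre_ excludes only x = [], where the Python A raises IndexError on x[0] (B raises there too).
def Pre_get_max_tab (x : List (List Int)) : Prop := x ≠ []
instance (x : List (List Int)) : Decidable (Pre_get_max_tab x) := by unfold Pre_get_max_tab; infer_instance
def pvWitness_get_max_tab : List (List Int) := [[1, 2], [3]]
def Spec_get_max_tab (x : List (List Int)) (out : List Int) : Prop := out = get_max_tab_alt x
instance (x : List (List Int)) (out : List Int) : Decidable (Spec_get_max_tab x out) := by unfold Spec_get_max_tab; infer_instance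

-- ===== CLAIM (what is proved, stated in full; the proofs are below) =====
def Claim_equal_get_max_tab : Prop := ∀ (x : List (List Int)), Dom_get_max_tab x → Pre_get_max_tab x → Spec_get_max_tab x (get_max_tab x)

-- ===== LEMMAS AND PROOFS =====

-- running column maximum, the common normal form of both sides at column i
def pvColMax (i : Nat) (t : List (List Int)) (a : Int) : Int :=
  t.foldl (fun m row => match row[i]? with | some v => max m v | none => m) a

-- the Option-valued variant (what B's indexed fold and A's max? both reduce to)
def pvColMax? (i : Nat) (t : List (List Int)) (o : Option Int) : Option Int :=
  t.foldl (fun m? row => match row[i]? with | some v => m?.map (fun m => max m v) | none => m?) o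

theorem pvColMax?_some (i : Nat) (t : List (List Int)) (a : Int) :
    pvColMax? i t (some a) = some (pvColMax i t a) := by
  induction t generalizing a with
  | nil => rfl
  | cons r t ih =>
    simp only [pvColMax?, pvColMax, List.foldl_cons] at *
    cases h : r[i]? <;> simp [ih]

-- B's step, indexed: one row folded into maxes, read at column i
theorem pvStepB (maxes row : List Int) (i : Nat) :
    (List.zipWith max maxes row ++ maxes.drop row.length)[i]? =
      match row[i]? with
      | some v => maxes[i]?.map (fun m => max m v)
      | none => maxes[i]? := by
  induction maxes generalizing row i with
  | nil =>
    simp only [List.zipWith_nil_left, List.drop_nil, List.nil_append]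
    cases h : row[i]? <;> simp
  | cons m ms ih =>
    cases row with
    | nil => simp
    | cons v vs =>
      cases i with
      | zero => simp
      | succ j => simpa using ih vs j

theorem pvFoldB_getElem? (t : List (List Int)) (maxes : List Int) (i : Nat) :
    ((t.foldl (fun maxes row => List.zipWith max maxes row ++ maxes.drop row.length) maxes))[i]? =
      pvColMax? i t maxes[i]? := by
  induction t generalizing maxes with
  | nil => rfl
  | cons r t ih =>
    simp only [List.foldl_cons, pvColMax?] at *
    rw [ih, pvStepB]

theorem pvFoldB_length (t : List (List Int)) (maxes : List Int) :
    ((t.foldl (fun maxes row => List.zipWith max maxes row ++ maxes.drop row.length) maxes)).length =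
      maxes.length := by
  induction t generalizing maxes with
  | nil => rfl
  | cons r t ih =>
    simp only [List.foldl_cons]
    rw [ih]; simp; omega

-- A's collected column list, then max?, equals the option fold (for a nonempty start)
theorem pvMaxCollect (i : Nat) (t : List (List Int)) (l : List Int) (hl : l ≠ []) :
    PySem.List.max? (t.foldl (fun acc row =>
        match row[i]? with | some v => acc ++ [v] | none => acc) l) (fun v => v)
      = pvColMax? i t (PySem.List.max? l (fun v => v)) := by
  induction t generalizing l with
  | nil => rfl
  | cons r t ih =>
    simp only [List.foldl_cons, pvColMax?] at *
    cases h : r[i]? with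
    | none => simp [ih l hl]
    | some v =>
      rw [ih (l ++ [v]) (by simp)]
      congr 1
      -- max? (l ++ [v]) = (max? l).map (fun m => max m v) for l ≠ []
      obtain ⟨m, hm⟩ : ∃ m, PySem.List.max? l (fun v => v) = some m := by
        cases hq : PySem.List.max? l (fun v => v) with
        | none => exact absurd ((PySem.List.max?_eq_none_iff l (fun v => v)).mp hq) hl
        | some m => exact ⟨m, rfl⟩
      simp only [PySem.List.max?, List.foldl_append] at hm ⊢
      rw [hm]
      simp only [List.foldl_cons, List.foldl_nil, Option.map_some]
      split_ifs with h1 <;> exact congrArg some (by omega)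

-- ===== VERDICT (by name: the statement is the Claim_ definition above) =====
theorem get_max_tab_spec : Claim_equal_get_max_tab := by
  intro x _ hx
  unfold Spec_get_max_tab
  obtain ⟨h, t, rfl⟩ : ∃ h t, x = h :: t := by
    cases x with
    | nil => exact absurd rfl hx
    | cons h t => exact ⟨h, t, rfl⟩
  unfold get_max_tab get_max_tab_alt
  simp only [List.headD_cons, List.drop_one, List.tail_cons]
  rw [PySem.List.pyRange_zero_nat, PySem.List.foldl_append_singleton_eq_map]
  apply List.ext_getElem?
  intro i
  simp only [List.nil_append]
  by_cases hi : i < h.length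
  · rw [List.getElem?_map, List.getElem?_map, List.getElem?_range hi]
    simp only [Option.map_some]
    rw [pvFoldB_getElem?]
    have hhi : h[i]? = some h[i] := List.getElem?_eq_getElem hi
    rw [hhi]
    -- A side at column i
    have hcoll : (h :: t).foldl (fun acc row =>
        match PySem.List.pyGet? row ((i : Nat) : Int) with
        | some v => acc ++ [v] | none => acc) ([] : List Int)
        = t.foldl (fun acc row =>
            match row[i]? with | some v => acc ++ [v] | none => acc) [h[i]] := by
      simp only [List.foldl_cons, PySem.List.pyGet?_natCast, hhi]
      rfl
    rw [hcoll, pvMaxCollect i t [h[i]] (by simp)]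
    have : PySem.List.max? [h[i]] (fun v => v) = some h[i] := rfl
    rw [this, pvColMax?_some]
    rfl
  · rw [List.getElem?_map, List.getElem?_map]
    rw [List.getElem?_eq_none (by simpa using hi)]
    rw [List.getElem?_eq_none]
    · rfl
    · rw [pvFoldB_length]; omega
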